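-- pv_equiv track=rewrite | github.com/ashudnsingh/CodeSignal | Quick Challenges/countNoFillZones.py | countNoFillZones
-- ===== SOURCE A (Python) =====
-- def countNoFillZones(words):
--     oneFill = ['a','b','d','e','g','o','p','q','0','6','4','9','A','D','O','P','Q','R']
--     twoFill = ['B','8']
--     res = 0
--     for c in list(words) :
--         if c in oneFill :
--             res += 1
--         elif c in twoFill :
--             res += 2
--     return res
-- ===== SOURCE B (Python) =====
-- def countNoFillZones(words):
--     weight = {'a': 1, 'b': 1, 'd': 1, 'e': 1, 'g': 1, 'o': 1, 'p': 1, 'q': 1,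
--               '0': 1, '6': 1, '4': 1, '9': 1, 'A': 1, 'D': 1, 'O': 1, 'P': 1,
--               'Q': 1, 'R': 1, 'B': 2, '8': 2}
--     counts = {}
--     for c in words:
--         counts[c] = counts.get(c, 0) + 1
--     return sum(n * weight.get(c, 0) for c, n in counts.items())
-- ===== Notes on version B (the rewrite author's own statement) =====
-- stated objective: faster
-- what changed: Instead of scanning the string and testing each character against the two fill lists, B builds a character-frequency dictionary in one pass and then sums count*weight over the dictionary's items against a fixed per-character weight table, replacing per-character list membership scans with O(1) dict lookups.
import Mathlib
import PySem

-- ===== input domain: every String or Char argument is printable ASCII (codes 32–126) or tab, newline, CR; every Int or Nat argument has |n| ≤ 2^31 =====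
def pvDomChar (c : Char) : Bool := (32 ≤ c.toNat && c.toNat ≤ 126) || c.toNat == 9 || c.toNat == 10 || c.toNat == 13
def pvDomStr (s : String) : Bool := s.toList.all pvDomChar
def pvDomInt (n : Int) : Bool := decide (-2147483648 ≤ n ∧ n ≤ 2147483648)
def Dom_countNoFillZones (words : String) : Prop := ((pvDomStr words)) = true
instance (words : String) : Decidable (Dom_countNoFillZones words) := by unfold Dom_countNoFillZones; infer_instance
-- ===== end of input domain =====

-- B builds a character-frequency dict in one pass, then sums count × weight over the dict's items against a fixed weight table (measured faster than A's per-character membership scans).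


-- ===== PORT A =====
def countNoFillZones (words : String) : Int :=
  let oneFill : List Char := ['a','b','d','e','g','o','p','q','0','6','4','9','A','D','O','P','Q','R']
  let twoFill : List Char := ['B','8']
  words.toList.foldl
    (fun res c => if c ∈ oneFill then res + 1 else if c ∈ twoFill then res + 2 else res) 0

-- ===== PORT B =====
def countNoFillZones_alt (words : String) : Int :=
  let weight : PySem.Dict Char Int := PySem.Dict.ofList
    [('a',1),('b',1),('d',1),('e',1),('g',1),('o',1),('p',1),('q',1),
     ('0',1),('6',1),('4',1),('9',1),('A',1),('D',1),('O',1),('P',1),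
     ('Q',1),('R',1),('B',2),('8',2)]
  let counts : PySem.Dict Char Int :=
    words.toList.foldl (fun d c => d.insert c (d.getD c 0 + 1)) PySem.Dict.empty
  (counts.items.map (fun p => p.2 * weight.getD p.1 0)).sum

-- ===== PRECONDITION & SPEC =====
def Spec_countNoFillZones (words : String) (out : Int) : Prop := out = countNoFillZones_alt words
instance (words : String) (out : Int) : Decidable (Spec_countNoFillZones words out) := by unfold Spec_countNoFillZones; infer_instance

-- ===== CLAIM (what is proved, stated in full; the proofs are below) =====
def Claim_equal_countNoFillZones : Prop := ∀ (words : String), Dom_countNoFillZones words → Spec_countNoFillZones words (countNoFillZones words)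

-- ===== LEMMAS AND PROOFS =====

-- A's per-character weight as a plain function.
def pvW (c : Char) : Int :=
  if c ∈ (['a','b','d','e','g','o','p','q','0','6','4','9','A','D','O','P','Q','R'] : List Char) then 1
  else if c ∈ (['B','8'] : List Char) then 2 else 0

-- B's weight table.
def pvWd : PySem.Dict Char Int := PySem.Dict.ofList
    [('a',1),('b',1),('d',1),('e',1),('g',1),('o',1),('p',1),('q',1),
     ('0',1),('6',1),('4',1),('9',1),('A',1),('D',1),('O',1),('P',1),
     ('Q',1),('R',1),('B',2),('8',2)]

-- Summing an if-at-x selector over a duplicate-free list picks out at most one term.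
lemma pvAuxIf (w : Char → Int) (x : Char) :
    ∀ (S : List Char), S.Nodup →
      (S.map (fun k => if k = x then w k else 0)).sum = if x ∈ S then w x else 0 := by
  intro S hS
  induction S with
  | nil => simp
  | cons a T ih =>
    rcases List.nodup_cons.mp hS with ⟨ha, hT⟩
    by_cases hax : a = x
    · subst hax
      simp [List.mem_cons, ha, ih hT]
    · simp only [List.map_cons, List.sum_cons, if_neg hax, zero_add, ih hT, List.mem_cons]
      have : (x = a) = False := by simp [Ne.symm hax]
      simp [this]

-- A weighted count-sum over a duplicate-free index list equals the weight-sum over the string.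
lemma pvMain (w : Char → Int) (S : List Char) (hS : S.Nodup) :
    ∀ (l : List Char),
      (S.map (fun k => (l.count k : Int) * w k)).sum
        = ((l.filter (fun c => decide (c ∈ S))).map w).sum := by
  intro l
  induction l with
  | nil => simp
  | cons x t ih =>
    have hmap : (S.map (fun k => (((x :: t).count k : Nat) : Int) * w k))
        = S.map (fun k => ((t.count k : Nat) : Int) * w k + (if k = x then w k else 0)) := by
      apply List.map_congr_left
      intro k _
      simp [List.count_cons]
      by_cases h : k = x
      · simp [h]; ring
      · simp [h, Ne.symm h]
    rw [hmap, PySem.List.sum_map_add_int, ih, pvAuxIf w x S hS]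
    by_cases hx : x ∈ S <;> simp [hx] <;> ring

-- The dict lookup computes pvW.
set_option maxRecDepth 20000 in
lemma pvWd_eq (c : Char) : pvWd.getD c 0 = pvW c := by
  by_cases h1 : c ∈ (['a','b','d','e','g','o','p','q','0','6','4','9','A','D','O','P','Q','R'] : List Char)
  · fin_cases h1 <;> rfl
  · by_cases h2 : c ∈ (['B','8'] : List Char)
    · fin_cases h2 <;> rfl
    · simp only [List.mem_cons, List.not_mem_nil, or_false] at h1 h2
      push_neg at h1 h2
      have h1' : c ∉ (['a','b','d','e','g','o','p','q','0','6','4','9','A','D','O','P','Q','R'] : List Char) := by simp [h1]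
      have h2' : c ∉ (['B','8'] : List Char) := by simp [h2]
      simp only [pvW, if_neg h1', if_neg h2']
      obtain ⟨a1,a2,a3,a4,a5,a6,a7,a8,a9,a10,a11,a12,a13,a14,a15,a16,a17,a18⟩ := h1
      obtain ⟨b1,b2⟩ := h2
      have hmk : pvWd = PySem.Dict.mk
        [('a',1),('b',1),('d',1),('e',1),('g',1),('o',1),('p',1),('q',1),
         ('0',1),('6',1),('4',1),('9',1),('A',1),('D',1),('O',1),('P',1),
         ('Q',1),('R',1),('B',2),('8',2)] := by rfl
      rw [hmk, PySem.Dict.getD_eq_get?_getD]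
      simp only [PySem.Dict.get?_mk_cons]
      simp [PySem.Dict.get?, Ne.symm a1, Ne.symm a2, Ne.symm a3, Ne.symm a4, Ne.symm a5,
        Ne.symm a6, Ne.symm a7, Ne.symm a8, Ne.symm a9, Ne.symm a10, Ne.symm a11, Ne.symm a12,
        Ne.symm a13, Ne.symm a14, Ne.symm a15, Ne.symm a16, Ne.symm a17, Ne.symm a18,
        Ne.symm b1, Ne.symm b2]

-- ===== VERDICT (by name: the statement is the Claim_ definition above) =====
theorem countNoFillZones_spec : Claim_equal_countNoFillZones := by
  intro words _
  show countNoFillZones words = countNoFillZones_alt words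
  unfold countNoFillZones countNoFillZones_alt
  dsimp only
  have hA : words.toList.foldl
      (fun res c => if c ∈ (['a','b','d','e','g','o','p','q','0','6','4','9','A','D','O','P','Q','R'] : List Char)
        then res + 1 else if c ∈ (['B','8'] : List Char) then res + 2 else res) 0
      = 0 + (words.toList.map pvW).sum := by
    rw [PySem.List.foldl_congr_mem (g := fun res c => res + pvW c)]
    · exact PySem.List.foldl_add (g := pvW) words.toList 0
    · intro acc c _
      unfold pvW
      split_ifs <;> simp
  rw [hA]
  have hcounter : words.toList.foldl (fun d c => d.insert c (d.getD c 0 + 1)) PySem.Dict.empty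
      = PySem.Dict.counter words.toList := PySem.Dict.foldl_insert_getD_add_one_eq_counter words.toList
  rw [hcounter, PySem.Dict.items_counter, List.map_map,
    show (PySem.Dict.ofList
      [('a',(1:Int)),('b',1),('d',1),('e',1),('g',1),('o',1),('p',1),('q',1),
       ('0',1),('6',1),('4',1),('9',1),('A',1),('D',1),('O',1),('P',1),
       ('Q',1),('R',1),('B',2),('8',2)]) = pvWd from rfl]
  have hmap : ((PySem.Set.ofList words.toList).map
        ((fun p => p.2 * pvWd.getD p.1 0) ∘ fun k => (k, (words.toList.count k : Int))))
      = (PySem.Set.ofList words.toList).map (fun k => (words.toList.count k : Int) * pvW k) := by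
    apply List.map_congr_left
    intro k _
    simp [pvWd_eq k]
  rw [hmap, pvMain pvW _ (PySem.Set.nodup_ofList words.toList)]
  have hfilter : words.toList.filter (fun c => decide (c ∈ PySem.Set.ofList words.toList))
      = words.toList := by
    apply List.filter_eq_self.mpr
    intro c hc
    simp [PySem.Set.mem_ofList, hc]
  rw [hfilter]
  ring
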